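-- pv_equiv track=rewrite | github.com/q-pratz-chem/PyCI | pyci/fanci/apg1rosd.py | _generate_distinct_pairs
-- ===== SOURCE A (Python) =====
-- from itertools import chain, permutations, combinations
--
-- def _generate_distinct_pairs(lst: list, n: int) -> list:
--     if len(lst) < 2 * n:
--         raise ValueError("Not enough elements to form the required number of distinct pairs.")
--
--     def helper(available_elements, current_pairs):
--         if len(current_pairs) == n:
--             sorted_pairs = sorted(current_pairs, key=lambda x: (min(x), max(x)))
--             return [sorted_pairs]
--         results = []
--         for pair in combinations(available_elements, 2):
--             new_available_elements = [e for e in available_elements if e not in pair]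
--             results.extend(helper(new_available_elements, current_pairs + [pair]))
--         return results
--
--     return helper(lst, [])
-- ===== SOURCE B (Python) =====
-- from itertools import combinations
--
--
-- def _generate_distinct_pairs(lst: list, n: int) -> list:
--     if len(lst) < 2 * n:
--         raise ValueError("Not enough elements to form the required number of distinct pairs.")
--     # Iterative level-by-level worklist expansion instead of DFS recursion.
--     states = [(lst, [])]
--     for _ in range(n):
--         new_states = []
--         for available, current in states:
--             for pair in combinations(available, 2):
--                 new_states.append(
--                     ([e for e in available if e not in pair], current + [pair])
--                 )
--         states = new_states
--     return [sorted(current, key=lambda x: (min(x), max(x)))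
--             for _, current in states if len(current) == n]
-- ===== Notes on version B (the rewrite author's own statement) =====
-- stated objective: alternative
-- what changed: The recursive DFS helper is replaced by an iterative level-by-level worklist expansion (n rounds over a list of (available, chosen-pairs) states), keeping the same ValueError guard and the same final per-selection sort.
import Mathlib
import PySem

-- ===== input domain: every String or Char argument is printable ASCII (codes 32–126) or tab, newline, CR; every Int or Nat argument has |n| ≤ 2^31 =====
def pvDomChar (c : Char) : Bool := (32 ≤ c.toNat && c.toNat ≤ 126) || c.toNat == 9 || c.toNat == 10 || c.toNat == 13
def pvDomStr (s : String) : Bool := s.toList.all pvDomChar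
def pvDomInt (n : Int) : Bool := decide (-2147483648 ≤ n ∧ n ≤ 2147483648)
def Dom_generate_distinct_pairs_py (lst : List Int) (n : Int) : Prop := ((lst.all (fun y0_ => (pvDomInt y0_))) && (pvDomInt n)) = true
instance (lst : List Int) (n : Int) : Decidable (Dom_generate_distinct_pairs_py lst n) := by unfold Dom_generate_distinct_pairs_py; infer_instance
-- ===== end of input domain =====

-- B replaces A's recursive DFS helper by an iterative level-by-level worklist expansion
-- (objective: alternative decomposition, same result and same asymptotic cost).

-- ===== PORT A =====
-- itertools.combinations(l, 2) as a list of pairs, in CPython's index-lexicographic order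
def pvComb2 (l : List Int) : List (Int × Int) :=
  match l with
  | [] => []
  | x :: xs => xs.map (fun y => (x, y)) ++ pvComb2 xs

-- sorted(pairs, key=lambda x: (min(x), max(x)))
def pvSortPairs (l : List (Int × Int)) : List (Int × Int) :=
  PySem.List.sorted2 l (fun p => min p.1 p.2) (fun p => max p.1 p.2) false

lemma pvComb2_fst_mem {l : List Int} {p : Int × Int} (hp : p ∈ pvComb2 l) : p.1 ∈ l := by
  induction l with
  | nil => simp [pvComb2] at hp
  | cons x xs ih =>
    simp only [pvComb2, List.mem_append, List.mem_map] at hp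
    rcases hp with ⟨y, _, rfl⟩ | h
    · simp
    · exact List.mem_cons_of_mem _ (ih h)

lemma pvFilter_lt {l : List Int} {p : Int × Int} (hp : p ∈ pvComb2 l) :
    (l.filter (fun e => !(e == p.1 || e == p.2))).length < l.length := by
  refine List.length_filter_lt_length_iff_exists.mpr ⟨p.1, pvComb2_fst_mem hp, by simp⟩

-- A's recursive helper, transliterated
def pvHelperA (n : Int) (avail : List Int) (cur : List (Int × Int)) :
    List (List (Int × Int)) :=
  if (cur.length : Int) = n then [pvSortPairs cur]
  else (pvComb2 avail).attach.flatMap (fun q =>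
    pvHelperA n (avail.filter (fun e => !(e == q.1.1 || e == q.1.2))) (cur ++ [q.1]))
termination_by avail.length
decreasing_by simpa using pvFilter_lt q.2

def generate_distinct_pairs_py (lst : List Int) (n : Int) : List (List (Int × Int)) :=
  if (lst.length : Int) < 2 * n then []  -- Python raises ValueError here; excluded by Pre_
  else pvHelperA n lst []

-- ===== PORT B =====
-- one round of worklist expansion: the two inner 'for' loops of Source B
def pvStep (states : List (List Int × List (Int × Int))) :
    List (List Int × List (Int × Int)) :=
  states.flatMap (fun st =>
    (pvComb2 st.1).map (fun p =>
      (st.1.filter (fun e => !(e == p.1 || e == p.2)), st.2 ++ [p])))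

def generate_distinct_pairs_py_alt (lst : List Int) (n : Int) : List (List (Int × Int)) :=
  if (lst.length : Int) < 2 * n then []  -- same ValueError guard kept in Source B; excluded by Pre_
  else
    -- `for _ in range(n)`: n.toNat rounds
    let states := (List.range n.toNat).foldl (fun s _ => pvStep s) [(lst, [])]
    (states.filter (fun st => (st.2.length : Int) == n)).map (fun st => pvSortPairs st.2)

-- ===== PRECONDITION & SPEC =====
-- Pre_ excludes exactly the inputs where A raises ValueError (fewer than 2*n elements).
def Pre_generate_distinct_pairs_py (lst : List Int) (n : Int) : Prop :=
  ¬ ((lst.length : Int) < 2 * n)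
instance (lst : List Int) (n : Int) : Decidable (Pre_generate_distinct_pairs_py lst n) := by
  unfold Pre_generate_distinct_pairs_py; infer_instance

def pvWitness_generate_distinct_pairs_py : List Int × Int := ([1, 2, 3, 4], 2)

def Spec_generate_distinct_pairs_py (lst : List Int) (n : Int) (out : List (List (Int × Int))) : Prop := out = generate_distinct_pairs_py_alt lst n
instance (lst : List Int) (n : Int) (out : List (List (Int × Int))) : Decidable (Spec_generate_distinct_pairs_py lst n out) := by unfold Spec_generate_distinct_pairs_py; infer_instance

-- ===== CLAIM (what is proved, stated in full; the proofs are below) =====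
def Claim_equal_generate_distinct_pairs_py : Prop := ∀ (lst : List Int) (n : Int), Dom_generate_distinct_pairs_py lst n → Pre_generate_distinct_pairs_py lst n → Spec_generate_distinct_pairs_py lst n (generate_distinct_pairs_py lst n)

-- ===== LEMMAS AND PROOFS =====

lemma pvFlatMap_attach {α β : Type} (l : List α) (f : α → List β) :
    l.attach.flatMap (fun x => f x.1) = l.flatMap f := by
  rw [List.flatMap_eq_foldl, List.flatMap_eq_foldl]
  exact List.foldl_attach (f := fun acc a => acc ++ f a) (b := [])

lemma pvHelperA_eq (n : Int) (avail : List Int) (cur : List (Int × Int)) :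
    pvHelperA n avail cur =
      if (cur.length : Int) = n then [pvSortPairs cur]
      else (pvComb2 avail).flatMap (fun p =>
        pvHelperA n (avail.filter (fun e => !(e == p.1 || e == p.2))) (cur ++ [p])) := by
  rw [pvHelperA.eq_def]
  split
  · rfl
  · exact pvFlatMap_attach (pvComb2 avail)
      (fun p => pvHelperA n (List.filter (fun e => !(e == p.1 || e == p.2)) avail) (cur ++ [p]))

lemma pvStep_append (s₁ s₂ : List (List Int × List (Int × Int))) :
    pvStep (s₁ ++ s₂) = pvStep s₁ ++ pvStep s₂ := by
  simp [pvStep]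

lemma pvStep_iter_append (k : Nat) (s₁ s₂ : List (List Int × List (Int × Int))) :
    pvStep^[k] (s₁ ++ s₂) = pvStep^[k] s₁ ++ pvStep^[k] s₂ := by
  induction k generalizing s₁ s₂ with
  | zero => rfl
  | succ k ih => simp [Function.iterate_succ_apply, pvStep_append, ih]

lemma pvStep_iter_flatMap (k : Nat) (L : List (List Int × List (Int × Int))) :
    pvStep^[k] L = L.flatMap (fun st => pvStep^[k] [st]) := by
  induction L with
  | nil => simp [Function.iterate_fixed (by simp [pvStep] : pvStep [] = [])]
  | cons st L ih =>
    have : st :: L = [st] ++ L := rfl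
    rw [this, pvStep_iter_append, ih]; simp

lemma pvFoldl_range_step (k : Nat) (init : List (List Int × List (Int × Int))) :
    (List.range k).foldl (fun s _ => pvStep s) init = pvStep^[k] init := by
  induction k with
  | zero => rfl
  | succ k ih =>
    rw [List.range_succ, List.foldl_append, ih, List.foldl_cons, List.foldl_nil,
      Function.iterate_succ_apply']

-- main invariant: starting from one state with k rounds still to go, the DFS result
-- equals the filtered+sorted image of the worklist after k rounds
lemma pv_main (n : Int) (k : Nat) : ∀ (avail : List Int) (cur : List (Int × Int)),
    n = (cur.length : Int) + k →
    pvHelperA n avail cur =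
      ((pvStep^[k] [(avail, cur)]).filter (fun st => (st.2.length : Int) == n)).map
        (fun st => pvSortPairs st.2) := by
  induction k with
  | zero =>
    intro avail cur h
    rw [pvHelperA_eq]
    simp only [Nat.cast_zero, add_zero] at h
    simp [← h]
  | succ k ih =>
    intro avail cur h
    have hne : (cur.length : Int) ≠ n := by push_cast at h ⊢; omega
    rw [pvHelperA_eq, if_neg hne]
    have hstep : pvStep [(avail, cur)] =
        (pvComb2 avail).map (fun p =>
          (avail.filter (fun e => !(e == p.1 || e == p.2)), cur ++ [p])) := by
      simp [pvStep]
    rw [Function.iterate_succ_apply, hstep,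
      pvStep_iter_flatMap k, List.flatMap_map, List.filter_flatMap, List.map_flatMap]
    refine List.flatMap_congr ?_
    intro p hp
    refine ih _ _ ?_
    simp only [List.length_append, List.length_cons, List.length_nil]
    push_cast at h ⊢
    omega

lemma pvHelperA_neg (n : Int) (hn : n < 0) :
    ∀ (m : Nat) (avail : List Int) (cur : List (Int × Int)), avail.length ≤ m →
      pvHelperA n avail cur = [] := by
  intro m
  induction m with
  | zero =>
    intro avail cur h
    have hav : avail = [] := List.eq_nil_of_length_eq_zero (Nat.le_zero.mp h)
    subst hav
    rw [pvHelperA_eq, if_neg (by omega)]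
    simp [pvComb2]
  | succ m ih =>
    intro avail cur h
    rw [pvHelperA_eq, if_neg (by omega)]
    refine List.flatMap_eq_nil_iff.mpr ?_
    intro p hp
    exact ih _ _ (by have := pvFilter_lt hp; omega)

-- ===== VERDICT (by name: the statement is the Claim_ definition above) =====
theorem generate_distinct_pairs_py_spec : Claim_equal_generate_distinct_pairs_py := by
  intro lst n _ hpre
  unfold Spec_generate_distinct_pairs_py generate_distinct_pairs_py generate_distinct_pairs_py_alt
  rw [if_neg hpre, if_neg hpre]
  by_cases hn : 0 ≤ n
  · rw [pvFoldl_range_step]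
    exact pv_main n n.toNat lst [] (by simp [Int.toNat_of_nonneg hn])
  · rw [not_le] at hn
    rw [pvHelperA_neg n hn lst.length lst [] le_rfl]
    have h0 : n.toNat = 0 := Int.toNat_of_nonpos hn.le
    simp [h0, show ¬((0 : Int) = n) from by omega]
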